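-- pv_equiv track=rewrite | github.com/guangxush/ai-trading-lab | backend/app/agent/risk_agent.py | _calculate_risk_level_from_risks
-- ===== SOURCE A (Python) =====
-- from typing import Dict, List, Optional, Tuple
-- from enum import Enum
--
-- class RiskLevel(str, Enum):
--     """风险等级"""
--     LOW = "low"           # 低风险
--     MEDIUM = "medium"     # 中等风险
--     HIGH = "high"         # 高风险
--     CRITICAL = "critical" # 危险
--
-- def _calculate_risk_level_from_risks(risks: List[Dict]) -> str:
--     """根据风险列表计算整体风险等级"""
--     if not risks:
--         return RiskLevel.LOW.value
--
--     levels = [r["level"] for r in risks]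
--     if "critical" in levels:
--         return RiskLevel.CRITICAL.value
--     elif "high" in levels:
--         return RiskLevel.HIGH.value
--     elif "medium" in levels:
--         return RiskLevel.MEDIUM.value
--     else:
--         return RiskLevel.LOW.value
-- ===== SOURCE B (Python) =====
-- def _calculate_risk_level_from_risks(risks):
--     """Single max-accumulating pass over a level->priority table instead of three membership scans."""
--     priority = {"critical": 3, "high": 2, "medium": 1}
--     m = 0
--     for r in risks:
--         m = max(m, priority.get(r["level"], 0))
--     return ("low", "medium", "high", "critical")[m]
-- ===== Notes on version B (the rewrite author's own statement) =====
-- stated objective: alternative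
-- what changed: Replaces building the full levels list plus three ordered membership scans with one pass that folds each level through a priority table and keeps the running maximum, mapped back to a level name at the end.
import Mathlib
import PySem

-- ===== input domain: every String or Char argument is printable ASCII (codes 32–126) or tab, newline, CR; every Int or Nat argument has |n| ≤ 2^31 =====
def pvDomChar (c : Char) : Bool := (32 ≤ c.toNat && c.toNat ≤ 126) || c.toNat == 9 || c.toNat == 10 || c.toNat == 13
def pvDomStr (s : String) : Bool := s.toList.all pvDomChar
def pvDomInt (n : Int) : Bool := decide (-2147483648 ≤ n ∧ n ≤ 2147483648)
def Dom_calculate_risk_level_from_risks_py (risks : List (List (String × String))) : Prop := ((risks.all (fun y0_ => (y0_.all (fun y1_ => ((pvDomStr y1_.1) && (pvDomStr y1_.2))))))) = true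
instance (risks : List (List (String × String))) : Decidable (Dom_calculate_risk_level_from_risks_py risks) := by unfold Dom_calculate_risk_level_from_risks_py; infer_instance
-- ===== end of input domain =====

-- B is an alternative decomposition (one max-accumulating pass over a priority table instead of
-- three membership scans); equivalence is proved on inputs where every risk dict has a "level" key.

-- ===== PORT A =====
-- r["level"] on an association list: first match; Pre_ guarantees the key is present.
def pvLevelOf (r : List (String × String)) : String := (r.lookup "level").getD ""

def calculate_risk_level_from_risks_py (risks : List (List (String × String))) : String :=
  if risks = [] then "low"
  else
    let levels := risks.map pvLevelOf
    if "critical" ∈ levels then "critical"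
    else if "high" ∈ levels then "high"
    else if "medium" ∈ levels then "medium"
    else "low"

-- ===== PORT B =====
def pvPrio (s : String) : Nat :=
  if s = "critical" then 3 else if s = "high" then 2 else if s = "medium" then 1 else 0

def calculate_risk_level_from_risks_py_alt (risks : List (List (String × String))) : String :=
  let m := risks.foldl (fun acc r => max acc (pvPrio (pvLevelOf r))) 0
  if m = 3 then "critical" else if m = 2 then "high" else if m = 1 then "medium" else "low"

-- ===== PRECONDITION & SPEC =====
-- Pre_ excludes risks missing a "level" key: there Python A raises KeyError (returns nothing).
def Pre_calculate_risk_level_from_risks_py (risks : List (List (String × String))) : Prop :=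
  ∀ r ∈ risks, (r.lookup "level").isSome = true
instance (risks : List (List (String × String))) : Decidable (Pre_calculate_risk_level_from_risks_py risks) := by unfold Pre_calculate_risk_level_from_risks_py; infer_instance

def pvWitness_calculate_risk_level_from_risks_py : (List (List (String × String))) :=
  [[("level", "high")], [("level", "odd")]]

def Spec_calculate_risk_level_from_risks_py (risks : List (List (String × String))) (out : String) : Prop := out = calculate_risk_level_from_risks_py_alt risks
instance (risks : List (List (String × String))) (out : String) : Decidable (Spec_calculate_risk_level_from_risks_py risks out) := by unfold Spec_calculate_risk_level_from_risks_py; infer_instance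

-- ===== CLAIM (what is proved, stated in full; the proofs are below) =====
def Claim_equal_calculate_risk_level_from_risks_py : Prop := ∀ (risks : List (List (String × String))), Dom_calculate_risk_level_from_risks_py risks → Pre_calculate_risk_level_from_risks_py risks → Spec_calculate_risk_level_from_risks_py risks (calculate_risk_level_from_risks_py risks)

-- ===== LEMMAS AND PROOFS =====

-- B's fold over risks equals the max of n and pvMaxP of the mapped level list.
def pvMaxP (ls : List String) : Nat := ls.foldr (fun s acc => max (pvPrio s) acc) 0

theorem pvFold_map (risks : List (List (String × String))) (n : Nat) :
    risks.foldl (fun acc r => max acc (pvPrio (pvLevelOf r))) n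
      = (risks.map pvLevelOf).foldl (fun acc s => max acc (pvPrio s)) n := by
  induction risks generalizing n with
  | nil => rfl
  | cons r t ih => simp [List.foldl, ih]

theorem pvFold_eq (ls : List String) (n : Nat) :
    ls.foldl (fun acc s => max acc (pvPrio s)) n = max n (pvMaxP ls) := by
  induction ls generalizing n with
  | nil => simp [pvMaxP]
  | cons s t ih => simp only [List.foldl, pvMaxP, List.foldr, ih] at *; omega

theorem pvPrio_le (s : String) : pvPrio s ≤ 3 := by
  unfold pvPrio; split_ifs <;> omega

theorem pvMaxP_le (ls : List String) : pvMaxP ls ≤ 3 := by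
  induction ls with
  | nil => simp [pvMaxP]
  | cons s t ih => simp only [pvMaxP, List.foldr] at *; have := pvPrio_le s; omega

theorem pvMaxP_ge (ls : List String) (k : Nat) :
    k ≤ pvMaxP ls ↔ (k = 0 ∨ ∃ s ∈ ls, k ≤ pvPrio s) := by
  induction ls with
  | nil =>
    simp only [pvMaxP, List.foldr, List.not_mem_nil, false_and, exists_false, or_false]
    omega
  | cons s t ih =>
    simp only [pvMaxP, List.foldr] at *
    constructor
    · intro h
      rcases le_max_iff.mp h with h1 | h2
      · exact Or.inr ⟨s, List.mem_cons_self, h1⟩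
      · rcases ih.mp h2 with h0 | ⟨u, hu, hk⟩
        · exact Or.inl h0
        · exact Or.inr ⟨u, List.mem_cons_of_mem _ hu, hk⟩
    · rintro (h0 | ⟨u, hu, hk⟩)
      · omega
      · rcases List.mem_cons.mp hu with rfl | hu'
        · exact le_max_iff.mpr (Or.inl hk)
        · exact le_max_iff.mpr (Or.inr (ih.mpr (Or.inr ⟨u, hu', hk⟩)))

theorem pvPrio_eq3 (s : String) : 3 ≤ pvPrio s ↔ s = "critical" := by
  unfold pvPrio; split_ifs with h1 h2 h3 <;> simp_all

theorem pvPrio_eq2 (s : String) : 2 ≤ pvPrio s ↔ s = "critical" ∨ s = "high" := by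
  unfold pvPrio; split_ifs with h1 h2 h3 <;> simp_all

theorem pvPrio_eq1 (s : String) : 1 ≤ pvPrio s ↔ s = "critical" ∨ s = "high" ∨ s = "medium" := by
  unfold pvPrio; split_ifs with h1 h2 h3 <;> simp_all

theorem pvMaxP3 (ls : List String) : 3 ≤ pvMaxP ls ↔ "critical" ∈ ls := by
  rw [pvMaxP_ge]
  constructor
  · rintro (h | ⟨s, hs, hk⟩); · omega
    · rwa [(pvPrio_eq3 s).mp hk] at hs
  · intro h; exact Or.inr ⟨_, h, (pvPrio_eq3 _).mpr rfl⟩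

theorem pvMaxP2 (ls : List String) : 2 ≤ pvMaxP ls ↔ "critical" ∈ ls ∨ "high" ∈ ls := by
  rw [pvMaxP_ge]
  constructor
  · rintro (h | ⟨s, hs, hk⟩); · omega
    · rcases (pvPrio_eq2 s).mp hk with rfl | rfl
      · exact Or.inl hs
      · exact Or.inr hs
  · rintro (h | h)
    · exact Or.inr ⟨_, h, (pvPrio_eq2 _).mpr (Or.inl rfl)⟩
    · exact Or.inr ⟨_, h, (pvPrio_eq2 _).mpr (Or.inr rfl)⟩

theorem pvMaxP1 (ls : List String) : 1 ≤ pvMaxP ls ↔ "critical" ∈ ls ∨ "high" ∈ ls ∨ "medium" ∈ ls := by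
  rw [pvMaxP_ge]
  constructor
  · rintro (h | ⟨s, hs, hk⟩); · omega
    · rcases (pvPrio_eq1 s).mp hk with rfl | rfl | rfl
      · exact Or.inl hs
      · exact Or.inr (Or.inl hs)
      · exact Or.inr (Or.inr hs)
  · rintro (h | h | h)
    · exact Or.inr ⟨_, h, (pvPrio_eq1 _).mpr (Or.inl rfl)⟩
    · exact Or.inr ⟨_, h, (pvPrio_eq1 _).mpr (Or.inr (Or.inl rfl))⟩
    · exact Or.inr ⟨_, h, (pvPrio_eq1 _).mpr (Or.inr (Or.inr rfl))⟩

theorem pvAlt_maxP (risks : List (List (String × String))) :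
    calculate_risk_level_from_risks_py_alt risks =
      (let m := pvMaxP (risks.map pvLevelOf);
       if m = 3 then "critical" else if m = 2 then "high" else if m = 1 then "medium" else "low") := by
  unfold calculate_risk_level_from_risks_py_alt
  rw [pvFold_map, pvFold_eq]
  simp

-- ===== VERDICT (by name: the statement is the Claim_ definition above) =====
theorem calculate_risk_level_from_risks_py_spec : Claim_equal_calculate_risk_level_from_risks_py := by
  intro risks _ _
  unfold Spec_calculate_risk_level_from_risks_py
  rw [pvAlt_maxP]
  unfold calculate_risk_level_from_risks_py
  simp only []
  set ls := risks.map pvLevelOf with hls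
  have hle := pvMaxP_le ls
  by_cases hnil : risks = []
  · subst hnil; simp [pvMaxP] at hls ⊢; simp [hls]
  · simp only [if_neg hnil]
    by_cases hc : "critical" ∈ ls
    · have h3 : pvMaxP ls = 3 := le_antisymm hle ((pvMaxP3 ls).mpr hc)
      simp [hc, h3]
    · by_cases hh : "high" ∈ ls
      · have h2 : pvMaxP ls = 2 := by
          have := (pvMaxP2 ls).mpr (Or.inr hh)
          have h3 := (pvMaxP3 ls).not.mpr hc
          omega
        simp [hc, hh, h2]
      · by_cases hm : "medium" ∈ ls
        · have h1 : pvMaxP ls = 1 := by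
            have := (pvMaxP1 ls).mpr (Or.inr (Or.inr hm))
            have h2 := (pvMaxP2 ls).not.mpr (by tauto)
            omega
          simp [hc, hh, hm, h1]
        · have h0 : pvMaxP ls = 0 := by
            have h1 := (pvMaxP1 ls).not.mpr (by tauto)
            omega
          simp [hc, hh, hm, h0]
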